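-- pv_equiv track=rewrite | github.com/agustinacf/SegundoParcialIP | segundoParcial/solucion.py | tiempo_mas_rapido
-- ===== SOURCE A (Python) =====
-- def tiempo_mas_rapido (tiempos_salas: list[int])-> int:
--     indice_minimo: int = 0
--     tiempo_minimo: int = 999
--
--     for i in range(len(tiempos_salas)):
--         numero: int = tiempos_salas[i]
--         if 0 < numero < 61:
--             if tiempos_salas[i] < tiempo_minimo:
--                 indice_minimo = i
--                 tiempo_minimo = tiempos_salas[i]
--     return indice_minimo
-- ===== SOURCE B (Python) =====
-- def tiempo_mas_rapido(tiempos_salas: list[int]) -> int: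
--     orden = sorted(range(len(tiempos_salas)), key=lambda i: tiempos_salas[i])
--     for i in orden:
--         if 0 < tiempos_salas[i] < 61:
--             return i
--     return 0
-- ===== Notes on version B (the rewrite author's own statement) =====
-- stated objective: alternative
-- what changed: Replaces A's single fused running-min loop (sentinel 999, index/value state) by a sort-then-scan algorithm: stably sort the indices by their time and return the first index in that order whose time is valid (strictly positive and under 61 minutes), defaulting to index zero; stability makes the scan return the first minimizer exactly as A does.
import Mathlib
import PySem

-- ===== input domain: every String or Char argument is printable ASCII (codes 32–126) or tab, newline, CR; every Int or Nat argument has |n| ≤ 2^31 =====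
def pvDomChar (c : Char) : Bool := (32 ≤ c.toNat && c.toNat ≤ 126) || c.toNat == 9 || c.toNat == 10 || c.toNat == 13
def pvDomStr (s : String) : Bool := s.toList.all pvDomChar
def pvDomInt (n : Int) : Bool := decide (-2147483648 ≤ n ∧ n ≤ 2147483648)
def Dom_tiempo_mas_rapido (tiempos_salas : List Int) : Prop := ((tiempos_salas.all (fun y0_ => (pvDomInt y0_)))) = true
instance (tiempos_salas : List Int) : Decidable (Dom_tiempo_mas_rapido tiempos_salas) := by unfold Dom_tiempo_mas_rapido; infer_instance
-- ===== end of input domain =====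

-- ===== PORT A =====
-- B replaces A's fused running-min loop by sort-the-indices-by-time then scan for the first valid one (alternative algorithm; not faster).
def tiempo_mas_rapido (tiempos_salas : List Int) : Int :=
  ((PySem.List.pyRange 0 (PySem.List.len tiempos_salas) 1).foldl
    (fun (st : Int × Int) i =>
      let numero := PySem.List.pyGetD tiempos_salas i 0
      if 0 < numero ∧ numero < 61 then
        if PySem.List.pyGetD tiempos_salas i 0 < st.2 then (i, PySem.List.pyGetD tiempos_salas i 0)
        else st
      else st)
    ((0 : Int), (999 : Int))).1

-- ===== PORT B =====
def tiempo_mas_rapido_alt (tiempos_salas : List Int) : Int :=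
  let orden := PySem.List.sorted (PySem.List.pyRange 0 (PySem.List.len tiempos_salas) 1)
      (fun i => PySem.List.pyGetD tiempos_salas i 0) false
  -- the for-loop with early return: first element of 'orden' whose time is strictly between 0 and 61
  match orden.find? (fun i =>
      decide (0 < PySem.List.pyGetD tiempos_salas i 0) &&
      decide (PySem.List.pyGetD tiempos_salas i 0 < 61)) with
  | some i => i
  | none => 0

-- ===== PRECONDITION & SPEC =====
def Spec_tiempo_mas_rapido (tiempos_salas : List Int) (out : Int) : Prop := out = tiempo_mas_rapido_alt tiempos_salas
instance (tiempos_salas : List Int) (out : Int) : Decidable (Spec_tiempo_mas_rapido tiempos_salas out) := by unfold Spec_tiempo_mas_rapido; infer_instance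

-- ===== CLAIM =====
def Claim_equal_tiempo_mas_rapido : Prop := ∀ (tiempos_salas : List Int), Dom_tiempo_mas_rapido tiempos_salas → Spec_tiempo_mas_rapido tiempos_salas (tiempo_mas_rapido tiempos_salas)

-- ===== LEMMAS AND PROOFS =====

-- min? over a snoc: fold one more comparison onto min? of the prefix (first-extremal kept on ties)
theorem min?_snoc {α : Type} (key : α → Int) (l : List α) (x : α) :
    PySem.List.min? (l ++ [x]) key
      = match PySem.List.min? l key with
        | none => some x
        | some m => if key x < key m then some x else some m := by
  simp only [PySem.List.min?, List.foldl_append, List.foldl_cons, List.foldl_nil]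
  rfl

-- finding in 'insertBy x s' for key-sorted s: the earlier of x and s's first match, first-on-ties
theorem find?_insertBy {α : Type} (key : α → Int) (p : α → Bool) (x : α) (s : List α)
    (hs : s.Pairwise (fun a b => key a ≤ key b)) :
    (PySem.List.insertBy (fun a b => decide (key a < key b)) x s).find? p
      = match s.find? p with
        | none => if p x then some x else none
        | some y => if p x && decide (key x < key y) then some x else some y := by
  induction s with
  | nil =>
    simp [PySem.List.insertBy, List.find?]
  | cons z s ih =>
    have hz : ∀ y ∈ s, key z ≤ key y := (List.pairwise_cons.1 hs).1
    have hs' : s.Pairwise (fun a b => key a ≤ key b) := (List.pairwise_cons.1 hs).2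
    by_cases hlt : key x < key z
    · -- x is inserted in front
      have : PySem.List.insertBy (fun a b => decide (key a < key b)) x (z :: s)
          = x :: z :: s := by simp [PySem.List.insertBy, hlt]
      rw [this]
      rcases hfz : (z :: s).find? p with _ | y
      · cases hpx : p x <;> simp [hpx, hfz]
      · have hy : y ∈ z :: s := List.mem_of_find?_eq_some hfz
        have hzy : key z ≤ key y := by
          rcases List.mem_cons.1 hy with rfl | h
          · exact le_refl _
          · exact hz y h
        have hxy : key x < key y := lt_of_lt_of_le hlt hzy
        cases hpx : p x <;> simp [hpx, hfz, hxy]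
    · -- x goes after z
      have : PySem.List.insertBy (fun a b => decide (key a < key b)) x (z :: s)
          = z :: PySem.List.insertBy (fun a b => decide (key a < key b)) x s := by
        simp [PySem.List.insertBy, hlt]
      rw [this]
      cases hpz : p z
      · simp only [List.find?_cons, hpz]
        rw [ih hs']
      · simp [hpz, hlt]

-- MAIN: first valid element in the stable key-sorted order = first minimizer among valid elements
theorem find?_sorted_eq_min?_filter {α : Type} (key : α → Int) (p : α → Bool) (l : List α) :
    (PySem.List.sorted l key false).find? p = PySem.List.min? (l.filter p) key := by
  induction l using List.reverseRecOn with
  | nil => rfl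
  | append_singleton l x ih =>
    have hsnoc : PySem.List.sorted (l ++ [x]) key false
        = PySem.List.insertBy (fun a b => decide (key a < key b)) x
            (PySem.List.sorted l key false) := by
      rw [PySem.List.sorted_eq_foldl_insertBy, PySem.List.sorted_eq_foldl_insertBy,
        List.foldl_append]
      rfl
    rw [hsnoc, find?_insertBy key p x _ (PySem.List.sorted_pairwise l key), ih]
    cases hpx : p x
    · have hfx : List.filter p (l ++ [x]) = List.filter p l := by
        simp [List.filter_append, hpx]
      rw [hfx]
      rcases PySem.List.min? (l.filter p) key with _ | m <;> simp
    · have hfx : List.filter p (l ++ [x]) = List.filter p l ++ [x] := by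
        simp [List.filter_append, hpx]
      rw [hfx, min?_snoc]
      rcases PySem.List.min? (l.filter p) key with _ | m
      · simp
      · simp only [Bool.true_and]
        by_cases h : key x < key m <;> simp [h]

-- A's strict-improvement fold over indices IS min? followed by one comparison with the sentinel state
theorem fold_eq_min? {α : Type} (key : α → Int) (m : List α) (a : Int × Int) (g : α → Int) :
    m.foldl (fun st i => if key i < st.2 then (g i, key i) else st) a
    = match PySem.List.min? m key with
      | none => a
      | some j => if key j < a.2 then (g j, key j) else a := by
  induction m using List.reverseRecOn with
  | nil => rfl
  | append_singleton l x ih =>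
    rw [List.foldl_append, ih, min?_snoc]
    rcases PySem.List.min? l key with _ | j
    · rfl
    · by_cases h1 : key x < key j <;> by_cases h2 : key j < a.2 <;>
        simp only [h1, h2, if_true, if_false, List.foldl_cons, List.foldl_nil] <;>
        split_ifs <;> first | rfl | (exfalso; omega)

-- ===== VERDICT =====
theorem tiempo_mas_rapido_spec : Claim_equal_tiempo_mas_rapido := by
  intro xs _
  unfold Spec_tiempo_mas_rapido
  set key : Int → Int := fun i => PySem.List.pyGetD xs i 0 with hkey
  set idxs := PySem.List.pyRange 0 (PySem.List.len xs) 1 with hidxs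
  have hA : tiempo_mas_rapido xs
      = ((idxs.filter (fun i => decide (0 < key i ∧ key i < 61))).foldl
          (fun (st : Int × Int) i => if key i < st.2 then (i, key i) else st)
          ((0 : Int), (999 : Int))).1 := by
    unfold tiempo_mas_rapido
    rw [PySem.List.foldl_ite_eq_foldl_filter
          (p := fun i : Int => 0 < key i ∧ key i < 61)
          (f := fun (st : Int × Int) i => if key i < st.2 then (i, key i) else st)]
  have hB : tiempo_mas_rapido_alt xs
      = match (PySem.List.sorted idxs key false).find?
            (fun i => decide (0 < key i) && decide (key i < 61)) with
        | some i => i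
        | none => 0 := by
    unfold tiempo_mas_rapido_alt
    rfl
  rw [hA, hB, fold_eq_min? key, find?_sorted_eq_min?_filter key]
  have hpred : (fun i : Int => decide (0 < key i) && decide (key i < 61))
      = (fun i : Int => decide (0 < key i ∧ key i < 61)) := by
    funext i; simp [Bool.decide_and]
  rw [hpred]
  rcases hmin : PySem.List.min? (idxs.filter (fun i => decide (0 < key i ∧ key i < 61))) key
    with _ | j
  · rfl
  · have hj := PySem.List.min?_mem hmin
    have : key j < 61 := by
      have := (List.mem_filter.1 hj).2
      simp only [decide_eq_true_eq] at this
      exact this.2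
    have h999 : key j < 999 := by omega
    simp [h999]
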